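-- pv_equiv track=rewrite | github.com/Chris-Johnston/Easier68k | src/easier68k/core/util/split_bits.py | split_bits
-- ===== SOURCE A (Python) =====
-- def split_bits(word : int, amounts : list):
--     """
--     takes in a word and a list of bit amounts and returns
--     the bits in the word split up. See the doctests for concrete examples
--
--     >>> [bin(x) for x in split_bits(0b1001111010000001, [16])]
--     ['0b1001111010000001']
--
--     >>> [bin(x) for x in split_bits(0b1001111010000001, [8,8])]
--     ['0b10011110', '0b10000001']
--
--     not the whole 16 bits!
--     >>> [bin(x) for x in split_bits(0b1001111010000001, [8])]
--     Traceback (most recent call last):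
--     AssertionError: expected to split exactly one word
--
--     This is a test splitting MOVE.B (A1),D4
--     >>> [bin(x) for x in split_bits(0b0001001010000100, [2,2,3,3,3,3])]
--     ['0b0', '0b1', '0b1', '0b10', '0b0', '0b100']
--
--     """
--     nums = []
--     pos = 0
--     for amount in amounts:
--         # get a group of "amount" 1's
--         mask = 2**amount - 1
--
--         # shift mask to the left so it aligns where the last
--         # iteration ended off
--         shift = 16 - amount - pos
--         mask = mask << shift
--
--         # update location in the word
--         pos += amount
--
--         # extract the relavent bits
--         bits = word & mask
--
--         # shift back and insert the list to be returned
--         nums.append(bits >> shift)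
--
--     assert pos == 16, 'expected to split exactly one word'
--
--     return nums
-- ===== SOURCE B (Python) =====
-- def split_bits(word : int, amounts : list):
--     nums = []
--     total = 0
--     for amount in reversed(amounts):
--         nums.insert(0, word & ((1 << amount) - 1))
--         word >>= amount
--         total += amount
--     assert total == 16, 'expected to split exactly one word'
--     return nums
-- ===== Notes on version B (the rewrite author's own statement) =====
-- stated objective: alternative
-- what changed: B iterates over reversed(amounts) peeling each field off the LOW end of a shrinking word (g = word & ((1<<amount)-1); word >>= amount), prepending groups, instead of A's fixed word with a running position and a mask built and shifted to the high end each step.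
import Mathlib
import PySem

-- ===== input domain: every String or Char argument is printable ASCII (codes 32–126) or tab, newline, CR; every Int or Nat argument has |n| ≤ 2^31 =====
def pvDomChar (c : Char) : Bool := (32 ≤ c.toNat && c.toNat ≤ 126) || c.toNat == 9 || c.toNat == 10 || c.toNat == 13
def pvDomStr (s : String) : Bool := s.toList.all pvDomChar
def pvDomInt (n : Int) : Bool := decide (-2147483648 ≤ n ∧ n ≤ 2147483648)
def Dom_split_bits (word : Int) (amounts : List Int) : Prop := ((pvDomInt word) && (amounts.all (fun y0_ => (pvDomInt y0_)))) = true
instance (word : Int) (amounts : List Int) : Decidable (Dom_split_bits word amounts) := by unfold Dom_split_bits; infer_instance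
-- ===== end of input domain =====

-- B peels bitfield groups off the LOW end of the word over reversed(amounts), prepending each
-- group and shrinking the word by >>=, instead of A's high-end mask/shift with a running position
-- (objective: alternative decomposition, same cost).


-- ===== PORT A =====
-- literal transliteration of A: fold over amounts with state (nums, pos); `2**amount` is ported
-- as 2 ^ amount.toNat and the shifts use .toNat — exact on Pre_ (amounts nonnegative, so the
-- Python exponent and shift counts are the nonnegative ints these Nats denote).
def split_bits (word : Int) (amounts : List Int) : List Int :=
  (amounts.foldl (fun (st : List Int × Int) amount =>
      let mask : Int := 2 ^ amount.toNat - 1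
      let shiftN : Nat := (16 - amount - st.2).toNat
      let mask2 : Int := Int.shiftLeft mask shiftN
      let pos : Int := st.2 + amount
      let bits : Int := PySem.Int.band word mask2
      (st.1 ++ [Int.shiftRight bits shiftN], pos))
    ([], 0)).1

-- ===== PORT B =====
-- literal transliteration of B: fold over reversed(amounts) with state (nums, word, total);
-- each step prepends word & ((1 << amount) - 1) and shrinks word by >> amount.
def split_bits_alt (word : Int) (amounts : List Int) : List Int :=
  (amounts.reverse.foldl (fun (st : List Int × Int × Int) amount =>
      (PySem.Int.band st.2.1 (Int.shiftLeft 1 amount.toNat - 1) :: st.1,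
       Int.shiftRight st.2.1 amount.toNat,
       st.2.2 + amount))
    (([] : List Int), word, 0)).1

-- ===== PRECONDITION & SPEC =====
-- Pre_ excludes exactly the inputs where Python A raises: a negative amount makes `2**amount`
-- a float (TypeError at `<<`) or the shift negative (ValueError), and sum(amounts) ≠ 16 fails
-- the assert ('expected to split exactly one word').  A returns on every other input.
def Pre_split_bits (word : Int) (amounts : List Int) : Prop :=
  (∀ a ∈ amounts, 0 ≤ a) ∧ amounts.sum = 16

instance (word : Int) (amounts : List Int) : Decidable (Pre_split_bits word amounts) := by
  unfold Pre_split_bits; infer_instance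

def pvWitness_split_bits : Int × List Int := (4740, [2, 2, 3, 3, 3, 3])

def Spec_split_bits (word : Int) (amounts : List Int) (out : List Int) : Prop := out = split_bits_alt word amounts
instance (word : Int) (amounts : List Int) (out : List Int) : Decidable (Spec_split_bits word amounts out) := by unfold Spec_split_bits; infer_instance

-- ===== CLAIM (what is proved, stated in full; the proofs are below) =====
def Claim_equal_split_bits : Prop := ∀ (word : Int) (amounts : List Int), Dom_split_bits word amounts → Pre_split_bits word amounts → Spec_split_bits word amounts (split_bits word amounts)

-- ===== LEMMAS AND PROOFS =====

theorem pvShrDef (w : Int) (n : Nat) : Int.shiftRight w n = w >>> n := rfl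
theorem pvShlDef (w : Int) (n : Nat) : Int.shiftLeft w n = w <<< n := rfl

-- A's result, written as structural recursion on amounts with the running position as argument.
def pvGoA (word : Int) (pos : Int) : List Int → List Int
  | [] => []
  | a :: rest =>
    (PySem.Int.band word (((2 : Int) ^ a.toNat - 1) <<< (16 - a - pos).toNat) >>> (16 - a - pos).toNat)
      :: pvGoA word (pos + a) rest

theorem pvAfold (word : Int) (l : List Int) (st : List Int × Int) :
    (l.foldl (fun (st : List Int × Int) amount =>
      let mask : Int := 2 ^ amount.toNat - 1
      let shiftN : Nat := (16 - amount - st.2).toNat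
      let mask2 : Int := Int.shiftLeft mask shiftN
      let pos : Int := st.2 + amount
      let bits : Int := PySem.Int.band word mask2
      (st.1 ++ [Int.shiftRight bits shiftN], pos)) st).1
      = st.1 ++ pvGoA word st.2 l := by
  induction l generalizing st with
  | nil => simp [pvGoA]
  | cons a rest ih =>
    rw [List.foldl_cons, ih]
    simp [pvGoA, pvShrDef, pvShlDef]

-- the running word component of B's fold: the original word shifted by the sum of the amounts seen.
theorem pvBw (l : List Int) (st : List Int × Int × Int) :
    (l.foldl (fun (st : List Int × Int × Int) amount =>
      (PySem.Int.band st.2.1 (Int.shiftLeft 1 amount.toNat - 1) :: st.1,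
       Int.shiftRight st.2.1 amount.toNat,
       st.2.2 + amount)) st).2.1 = st.2.1 >>> (l.map Int.toNat).sum := by
  induction l generalizing st with
  | nil => simp
  | cons a rest ih =>
    rw [List.foldl_cons, ih]
    simp [pvShrDef, Int.shiftRight_add]

-- B on a::rest = the top group consed onto B on rest.
theorem pvBcons (word a : Int) (rest : List Int) :
    split_bits_alt word (a :: rest)
      = PySem.Int.band (word >>> (rest.map Int.toNat).sum) (((1 : Int) <<< a.toNat) - 1)
          :: split_bits_alt word rest := by
  unfold split_bits_alt
  rw [List.reverse_cons, List.foldl_append, List.foldl_cons, List.foldl_nil]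
  dsimp only
  rw [pvBw, List.map_reverse, List.sum_reverse]
  rfl

-- Python's & with a negative left operand and nonnegative right operand, in Nat terms.
theorem pvBandNeg (u : Nat) (m : Int) (hm : 0 ≤ m) :
    PySem.Int.band (Int.negSucc u) m = ((m.toNat - (m.toNat &&& u)) : Nat) := by
  unfold PySem.Int.band
  have h1 : ¬ (0 ≤ Int.negSucc u) := by omega
  have h2 : (-Int.negSucc u - 1) = (u : Int) := by omega
  rw [if_neg h1, if_pos hm, h2, Int.toNat_natCast]

-- Nat-level bit facts, by bit extensionality.
theorem pvN1 (wn M : Nat) (s : Nat) : (wn &&& (M <<< s)) >>> s = (wn >>> s) &&& M := by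
  apply Nat.eq_of_testBit_eq
  intro i
  simp [Nat.testBit_and, Nat.testBit_shiftRight, Nat.testBit_shiftLeft]

theorem pvN2 (M u : Nat) (s : Nat) : (M <<< s) &&& u = (M &&& (u >>> s)) <<< s := by
  apply Nat.eq_of_testBit_eq
  intro i
  simp only [Nat.testBit_and, Nat.testBit_shiftLeft]
  by_cases h : s ≤ i
  · simp [h, Nat.testBit_shiftRight]
  · simp [h]

-- the key identity: extracting a field by masking in place then shifting (A) equals shifting
-- first then masking low (B); holds for every integer word, negative included.
theorem pvKey (w m : Int) (s : Nat) (hm : 0 ≤ m) :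
    (PySem.Int.band w (m <<< s)) >>> s = PySem.Int.band (w >>> s) m := by
  have hms : (m <<< s) = ((m.toNat <<< s : Nat) : Int) := by
    rw [show m = ((m.toNat : Nat) : Int) by omega]; rfl
  match w with
  | Int.ofNat wn =>
    rw [show Int.ofNat wn = ((wn : Nat) : Int) from rfl]
    rw [hms, PySem.Int.band_of_nonneg (by positivity) (by positivity),
        show ((wn : Int) >>> s) = ((wn >>> s : Nat) : Int) from rfl,
        PySem.Int.band_of_nonneg (by positivity) hm]
    simp only [Int.toNat_natCast]
    rw [show (((wn &&& m.toNat <<< s : Nat) : Int) >>> s) = ((((wn &&& m.toNat <<< s) >>> s : Nat)) : Int) from rfl]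
    rw [pvN1]
  | Int.negSucc u =>
    rw [hms, pvBandNeg u _ (by positivity), Int.toNat_natCast,
        show (Int.negSucc u >>> s) = Int.negSucc (u >>> s) from rfl,
        pvBandNeg (u >>> s) m hm,
        show ((((m.toNat <<< s - (m.toNat <<< s &&& u)) : Nat) : Int) >>> s)
           = ((((m.toNat <<< s - (m.toNat <<< s &&& u)) >>> s : Nat)) : Int) from rfl]
    congr 1
    rw [pvN2, Nat.shiftLeft_eq, Nat.shiftLeft_eq, Nat.shiftRight_eq_div_pow,
        ← Nat.sub_mul, Nat.mul_div_cancel _ (by positivity)]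

theorem pvSumToNat (l : List Int) (h : ∀ a ∈ l, 0 ≤ a) :
    l.sum.toNat = (l.map Int.toNat).sum := by
  induction l with
  | nil => simp
  | cons a rest ih =>
    have ha : 0 ≤ a := h a (by simp)
    have hr : 0 ≤ rest.sum := List.sum_nonneg (by intro x hx; exact h x (by simp [hx]))
    have ih' := ih (by intro x hx; exact h x (by simp [hx]))
    simp only [List.sum_cons, List.map_cons, List.sum_cons]
    omega

theorem pvMain (word : Int) (amounts : List Int) (pos : Int)
    (hnn : ∀ a ∈ amounts, 0 ≤ a) (hsum : pos + amounts.sum = 16) :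
    pvGoA word pos amounts = split_bits_alt word amounts := by
  induction amounts generalizing pos with
  | nil => simp [pvGoA, split_bits_alt]
  | cons a rest ih =>
    have ha : 0 ≤ a := hnn a (by simp)
    have hrest : ∀ x ∈ rest, 0 ≤ x := by intro x hx; exact hnn x (by simp [hx])
    have hr : 0 ≤ rest.sum := List.sum_nonneg hrest
    have hS : (16 - a - pos).toNat = (rest.map Int.toNat).sum := by
      rw [show (16 - a - pos) = rest.sum by simp [List.sum_cons] at hsum; omega,
          pvSumToNat rest hrest]
    have hmask : ((1 : Int) <<< a.toNat) - 1 = 2 ^ a.toNat - 1 := by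
      rw [show ((1 : Int) <<< a.toNat) = ((1 <<< a.toNat : Nat) : Int) from rfl, Nat.one_shiftLeft]
      push_cast
      ring
    rw [pvGoA, pvBcons, hmask]
    congr 1
    · rw [hS, pvKey word (2 ^ a.toNat - 1) _
          (by have h2 : (1 : Int) ≤ 2 ^ a.toNat := one_le_pow₀ (by norm_num); omega)]
    · exact ih (pos + a) hrest (by simp [List.sum_cons] at hsum; omega)

-- ===== VERDICT (by name: the statement is the Claim_ definition above) =====
theorem split_bits_spec : Claim_equal_split_bits := by
  intro word amounts _ hpre
  unfold Spec_split_bits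
  have h1 : split_bits word amounts = pvGoA word 0 amounts := by
    unfold split_bits; rw [pvAfold]; simp
  rw [h1, pvMain word amounts 0 hpre.1 (by simpa using hpre.2)]
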